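-- pv_equiv track=rewrite | github.com/grahama1970/fetcher | src/fetcher/workflows/web_fetch.py | _env_int_list
-- ===== SOURCE A (Python) =====
-- from typing import Any, Callable, Dict, Iterable, List, Optional, Tuple, Set
--
-- def _env_int_list(raw: str) -> Tuple[int, ...]:
--     values: List[int] = []
--     for token in raw.split(","):
--         cleaned = token.strip()
--         if not cleaned:
--             continue
--         try:
--             values.append(int(cleaned))
--         except ValueError:
--             continue
--     # Preserve order but dedupe
--     deduped: List[int] = []
--     seen: Set[int] = set()
--     for val in values:
--         if val in seen:
--             continue
--         seen.add(val)
--         deduped.append(val)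
--     return tuple(deduped)
-- ===== SOURCE B (Python) =====
-- def _env_int_list(raw: str):
--     # Parse the tokens, then dedupe by recursively removing each head's
--     # duplicates from the remainder (classic "nub via filter") -- no seen set.
--
--     def to_int(token):
--         try:
--             return int(token.strip())
--         except ValueError:
--             return None
--
--     vals = [v for v in map(to_int, raw.split(',')) if v is not None]
--
--     def dedupe(lst):
--         if not lst:
--             return ()
--         head = lst[0]
--         return (head,) + dedupe([x for x in lst[1:] if x != head])
--
--     return dedupe(vals)
-- ===== Notes on version B (the rewrite author's own statement) =====
-- stated objective: alternative
-- what changed: Replaces A's seen-set dedupe loop with a recursive 'nub via filter': take the head, filter its duplicates out of the tail, recurse; parsing becomes a comprehension with a None-sentinel helper instead of an explicit accumulating loop.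
import Mathlib
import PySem

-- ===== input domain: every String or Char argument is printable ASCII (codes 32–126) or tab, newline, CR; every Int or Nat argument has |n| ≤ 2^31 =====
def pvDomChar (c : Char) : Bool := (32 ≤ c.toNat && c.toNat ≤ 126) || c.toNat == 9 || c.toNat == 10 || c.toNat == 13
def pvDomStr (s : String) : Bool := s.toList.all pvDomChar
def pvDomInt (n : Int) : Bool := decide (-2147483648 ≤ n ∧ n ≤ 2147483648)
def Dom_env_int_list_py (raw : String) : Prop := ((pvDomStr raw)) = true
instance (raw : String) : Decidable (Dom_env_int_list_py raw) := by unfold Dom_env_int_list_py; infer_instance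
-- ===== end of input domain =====

-- B drops A's seen-set dedupe: it parses by comprehension, then dedupes recursively by
-- filtering the head's duplicates out of the tail ("nub via filter"); objective: alternative.

-- ===== PORT A =====
-- A's parse step and dedupe step, named for the proofs.
def pvParseStep (vs : List Int) (token : List Char) : List Int :=
  let cleaned := PySem.Chars.strip token
  if cleaned = [] then vs
  else
    match PySem.Int.ofChars? cleaned with
    | some v => vs ++ [v]
    | none => vs

def pvDedupStep (st : List Int × PySem.Set Int) (val : Int) : List Int × PySem.Set Int :=
  if PySem.Set.contains st.2 val then st
  else (st.1 ++ [val], PySem.Set.add st.2 val)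

def env_int_list_py (raw : String) : List Int :=
  let values : List Int :=
    (PySem.Chars.splitOn raw.toList [',']).foldl pvParseStep []
  let st : List Int × PySem.Set Int :=
    values.foldl pvDedupStep ([], PySem.Set.empty)
  st.1

-- ===== PORT B =====
-- Source B's to_int: int(token.strip()) with None on ValueError.
def pvToInt (token : List Char) : Option Int :=
  PySem.Int.ofChars? (PySem.Chars.strip token)

-- Source B's dedupe: head, then recurse on the tail with the head's duplicates filtered out.
def pvDedupe : List Int → List Int
  | [] => []
  | h :: t => h :: pvDedupe (t.filter (fun x => x ≠ h))
termination_by l => l.length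
decreasing_by
  simp only [List.length_unattach]
  exact Nat.lt_succ_of_le (le_trans (List.length_filter_le _ _) (by simp))

def env_int_list_py_alt (raw : String) : List Int :=
  let vals : List Int :=
    (PySem.Chars.splitOn raw.toList [',']).filterMap pvToInt
  pvDedupe vals

-- ===== PRECONDITION & SPEC =====
def Spec_env_int_list_py (raw : String) (out : List Int) : Prop := out = env_int_list_py_alt raw
instance (raw : String) (out : List Int) : Decidable (Spec_env_int_list_py raw out) := by unfold Spec_env_int_list_py; infer_instance

-- ===== CLAIM =====
def Claim_equal_env_int_list_py : Prop := ∀ (raw : String), Dom_env_int_list_py raw → Spec_env_int_list_py raw (env_int_list_py raw)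

-- ===== LEMMAS AND PROOFS =====

-- A's first pass collects exactly the successfully parsed tokens (int('') is a ValueError,
-- so A's explicit empty-token skip coincides with pvToInt returning none).
theorem pvParse_eq (tokens : List (List Char)) (vs : List Int) :
    tokens.foldl pvParseStep vs = vs ++ tokens.filterMap pvToInt := by
  induction tokens generalizing vs with
  | nil => simp
  | cons t ts ih =>
      simp only [List.foldl_cons, List.filterMap_cons, pvParseStep, pvToInt]
      by_cases h : PySem.Chars.strip t = []
      · simp [h, ih, pvToInt, show PySem.Int.ofChars? ([] : List Char) = none from rfl]
      · simp only [h, if_false]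
        cases hv : PySem.Int.ofChars? (PySem.Chars.strip t) <;> simp [ih, pvToInt]

-- A's dedupe fold keeps its output list equal to its seen set (as a list).
theorem pvDedupFold_eq (vals : List Int) (s : PySem.Set Int) :
    vals.foldl pvDedupStep (s, s) = (vals.foldl PySem.Set.add s, vals.foldl PySem.Set.add s) := by
  induction vals generalizing s with
  | nil => rfl
  | cons v vs ih =>
      simp only [List.foldl_cons, pvDedupStep]
      by_cases hc : PySem.Set.contains s v = true
      · have hm : v ∈ s := by simpa [PySem.Set.contains] using hc
        have ha : PySem.Set.add s v = s := by simp [PySem.Set.add, hm]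
        rw [if_pos hc, ha]
        exact ih s
      · have hm : v ∉ s := by simpa [PySem.Set.contains] using hc
        have ha : PySem.Set.add s v = s ++ [v] := by simp [PySem.Set.add, hm]
        rw [if_neg hc, ha]
        exact ih (s ++ [v])

-- Adding elements all different from h to h :: s prepends h to adding them to s.
theorem foldl_add_cons (h : Int) (t : List Int) (s : PySem.Set Int)
    (hne : ∀ x ∈ t, x ≠ h) :
    t.foldl PySem.Set.add (h :: s) = h :: t.foldl PySem.Set.add s := by
  induction t generalizing s with
  | nil => rfl
  | cons x r ih =>
      have hxh : x ≠ h := hne x (by simp)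
      have hadd : PySem.Set.add (h :: s) x = h :: PySem.Set.add s x := by
        by_cases hm : x ∈ s <;>
          simp [PySem.Set.add, PySem.Set.contains, hxh, hm]
      rw [List.foldl_cons, List.foldl_cons, hadd,
          ih _ (fun y hy => hne y (by simp [hy]))]

-- Once h is in the set, its later occurrences are no-ops: filtering them out changes nothing.
theorem foldl_add_filter (h : Int) (t : List Int) (s : PySem.Set Int) (hs : h ∈ s) :
    t.foldl PySem.Set.add s = (t.filter (fun x => x ≠ h)).foldl PySem.Set.add s := by
  induction t generalizing s with
  | nil => rfl
  | cons x r ih =>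
      by_cases hx : x = h
      · subst hx
        have ha : PySem.Set.add s x = s := by simp [PySem.Set.add, hs]
        rw [List.foldl_cons, ha]
        simpa using ih s hs
      · have hmem : h ∈ PySem.Set.add s x := by
          simp only [PySem.Set.add]; split <;> simp [hs]
        rw [List.foldl_cons]
        simp only [List.filter_cons, decide_eq_true_eq]
        rw [if_pos (by simpa using hx), List.foldl_cons]
        exact ih _ hmem

-- B's recursive "nub via filter" computes the first occurrences, i.e. PySem.Set.ofList.
theorem pvDedupe_eq_ofList_aux : ∀ (n : Nat) (l : List Int), l.length ≤ n →
    pvDedupe l = PySem.Set.ofList l := by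
  intro n
  induction n with
  | zero =>
      intro l hl
      have : l = [] := List.eq_nil_of_length_eq_zero (Nat.le_zero.mp hl)
      subst this
      rw [pvDedupe]; rfl
  | succ m ih =>
      intro l hl
      cases l with
      | nil => rw [pvDedupe]; rfl
      | cons h t =>
          rw [pvDedupe]
          have hlen : (t.filter (fun x => x ≠ h)).length ≤ m := by
            have := List.length_filter_le (fun x => decide (x ≠ h)) t
            have ht : t.length ≤ m := by simpa using hl
            omega
          rw [ih _ hlen, PySem.Set.ofList_eq_foldl, PySem.Set.ofList_eq_foldl,
              List.foldl_cons,
              show PySem.Set.add ([] : PySem.Set Int) h = [h] from rfl,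
              foldl_add_filter h t [h] (by simp),
              show ([h] : List Int) = h :: ([] : List Int) from rfl,
              foldl_add_cons h _ [] (fun x hx => by simpa using (List.mem_filter.mp hx).2)]

theorem pvDedupe_eq_ofList (l : List Int) : pvDedupe l = PySem.Set.ofList l :=
  pvDedupe_eq_ofList_aux l.length l (Nat.le_refl _)

-- ===== VERDICT =====
theorem env_int_list_py_spec : Claim_equal_env_int_list_py := by
  intro raw _
  unfold Spec_env_int_list_py env_int_list_py env_int_list_py_alt
  rw [pvParse_eq]
  simp only [List.nil_append]
  rw [show (PySem.Set.empty : PySem.Set Int) = ([] : List Int) from rfl, pvDedupFold_eq,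
      pvDedupe_eq_ofList, PySem.Set.ofList_eq_foldl]
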